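-- pv_equiv track=rewrite | github.com/Ventrosky/python-scripts | dice-poker_bot.py | _harderTie
-- ===== SOURCE A (Python) =====
-- def _harderTie(hand):
-- 	dices = set()
-- 	for die in hand:
-- 		if hand.count(die) == 3:
-- 			dices.update({(3,die)})
-- 		elif hand.count(die) == 2:
-- 			dices.update({(2,die)})
-- 	return list(sorted(dices, reverse=True))
-- ===== SOURCE B (Python) =====
-- def _harderTie(hand):
--     counts = {}
--     for die in hand:
--         counts[die] = counts.get(die, 0) + 1
--     pairs = [(n, die) for die, n in counts.items() if n == 2 or n == 3]
--     return sorted(pairs, reverse=True)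
-- ===== Notes on version B (the rewrite author's own statement) =====
-- stated objective: faster
-- what changed: B builds a frequency dict in one pass and emits (count,die) once per unique die from its items, replacing A's per-position hand.count scans and the dedup set entirely.
import Mathlib
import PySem

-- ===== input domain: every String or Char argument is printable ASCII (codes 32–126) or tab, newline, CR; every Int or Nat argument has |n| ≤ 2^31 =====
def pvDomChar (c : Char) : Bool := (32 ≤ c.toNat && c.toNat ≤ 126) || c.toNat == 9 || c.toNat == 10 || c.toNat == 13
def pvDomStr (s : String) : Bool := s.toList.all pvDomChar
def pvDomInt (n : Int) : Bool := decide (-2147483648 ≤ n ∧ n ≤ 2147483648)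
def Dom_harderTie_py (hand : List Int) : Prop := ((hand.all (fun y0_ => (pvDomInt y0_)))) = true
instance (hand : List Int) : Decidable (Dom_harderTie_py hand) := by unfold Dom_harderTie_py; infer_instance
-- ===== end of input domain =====

-- B replaces A's per-position hand.count scans + dedup set with one frequency dict and a pass over its unique items (faster).


-- ===== PORT A =====
def harderTie_py (hand : List Int) : List (Int × Int) :=
  let dices : PySem.Set (Int × Int) :=
    hand.foldl (fun dices die =>
      if PySem.List.count hand die = 3 then PySem.Set.update dices [((3 : Int), die)]
      else if PySem.List.count hand die = 2 then PySem.Set.update dices [((2 : Int), die)]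
      else dices) PySem.Set.empty
  PySem.List.sorted2 dices (fun p => p.1) (fun p => p.2) true

-- ===== PORT B =====
def harderTie_py_alt (hand : List Int) : List (Int × Int) :=
  let counts : PySem.Dict Int Int :=
    hand.foldl (fun c die => c.insert die (c.getD die 0 + 1)) PySem.Dict.empty
  let pairs : List (Int × Int) :=
    counts.items.filterMap (fun p => if p.2 = 2 ∨ p.2 = 3 then some (p.2, p.1) else none)
  PySem.List.sorted2 pairs (fun p => p.1) (fun p => p.2) true

-- ===== PRECONDITION & SPEC =====
def Spec_harderTie_py (hand : List Int) (out : List (Int × Int)) : Prop := out = harderTie_py_alt hand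
instance (hand : List Int) (out : List (Int × Int)) : Decidable (Spec_harderTie_py hand out) := by unfold Spec_harderTie_py; infer_instance

-- ===== CLAIM (what is proved, stated in full; the proofs are below) =====
def Claim_equal_harderTie_py : Prop := ∀ (hand : List Int), Dom_harderTie_py hand → Spec_harderTie_py hand (harderTie_py hand)

-- ===== LEMMAS AND PROOFS =====

/-- selector for a qualifying die: the (count, die) pair both programs emit -/
def pvG (hand : List Int) (d : Int) : Option (Int × Int) :=
  if List.count d hand = 3 then some ((3 : Int), d)
  else if List.count d hand = 2 then some ((2 : Int), d)
  else none

theorem pvG_snd {hand : List Int} {d : Int} {p : Int × Int} (h : pvG hand d = some p) : p.2 = d := by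
  unfold pvG at h
  split_ifs at h
  · cases Option.some.inj h; rfl
  · cases Option.some.inj h; rfl

theorem mem_filterMap_pvG {hand : List Int} {seen : List Int} {p : Int × Int} :
    p ∈ seen.filterMap (pvG hand) ↔ p.2 ∈ seen ∧ pvG hand p.2 = some p := by
  simp only [List.mem_filterMap]
  constructor
  · rintro ⟨d, hd, hg⟩
    have := pvG_snd hg
    subst this; exact ⟨hd, hg⟩
  · rintro ⟨hd, hg⟩; exact ⟨p.2, hd, hg⟩

theorem pvA_loop (hand : List Int) :
    ∀ (l seen : List Int),
      l.foldl (fun dices die =>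
        if PySem.List.count hand die = 3 then PySem.Set.update dices [((3 : Int), die)]
        else if PySem.List.count hand die = 2 then PySem.Set.update dices [((2 : Int), die)]
        else dices) (seen.filterMap (pvG hand))
      = (PySem.Set.update seen l).filterMap (pvG hand) := by
  intro l
  induction l with
  | nil => intro seen; rfl
  | cons x l ih =>
    intro seen
    have hstep : PySem.Set.update seen (x :: l) = PySem.Set.update (PySem.Set.add seen x) l := rfl
    rw [List.foldl_cons, hstep]
    have hadd : ∀ (s : PySem.Set (Int × Int)) (p : Int × Int),
        PySem.Set.add s p = if p ∈ s then s else s ++ [p] := by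
      intro s p
      simp [PySem.Set.add, PySem.Set.contains]
    by_cases hx : x ∈ seen
    · have hseen : PySem.Set.add seen x = seen := by
        simp [PySem.Set.add, PySem.Set.contains, hx]
      rw [hseen]
      have harg :
          (if PySem.List.count hand x = 3 then PySem.Set.update (seen.filterMap (pvG hand)) [((3 : Int), x)]
           else if PySem.List.count hand x = 2 then PySem.Set.update (seen.filterMap (pvG hand)) [((2 : Int), x)]
           else seen.filterMap (pvG hand)) = seen.filterMap (pvG hand) := by
        split_ifs with h3 h2
        · replace h3 : List.count x hand = 3 := by simpa [PySem.List.count] using h3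
          show PySem.Set.add (seen.filterMap (pvG hand)) ((3 : Int), x) = _
          rw [hadd]
          have hm : ((3 : Int), x) ∈ seen.filterMap (pvG hand) := by
            rw [mem_filterMap_pvG]
            exact ⟨hx, by simp [pvG, h3]⟩
          simp [hm]
        · replace h3 : ¬ List.count x hand = 3 := by simpa [PySem.List.count] using h3
          replace h2 : List.count x hand = 2 := by simpa [PySem.List.count] using h2
          show PySem.Set.add (seen.filterMap (pvG hand)) ((2 : Int), x) = _
          rw [hadd]
          have hm : ((2 : Int), x) ∈ seen.filterMap (pvG hand) := by
            rw [mem_filterMap_pvG]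
            exact ⟨hx, by simp [pvG, h2]⟩
          simp [hm]
        · rfl
      rw [harg]; exact ih seen
    · have hseen : PySem.Set.add seen x = seen ++ [x] := by
        simp [PySem.Set.add, PySem.Set.contains, hx]
      rw [hseen]
      have hnotmem : ∀ (c : Int), ((c, x) : Int × Int) ∉ seen.filterMap (pvG hand) := by
        intro c hc
        exact hx (mem_filterMap_pvG.mp hc).1
      have harg :
          (if PySem.List.count hand x = 3 then PySem.Set.update (seen.filterMap (pvG hand)) [((3 : Int), x)]
           else if PySem.List.count hand x = 2 then PySem.Set.update (seen.filterMap (pvG hand)) [((2 : Int), x)]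
           else seen.filterMap (pvG hand)) = (seen ++ [x]).filterMap (pvG hand) := by
        rw [List.filterMap_append]
        split_ifs with h3 h2
        · replace h3 : List.count x hand = 3 := by simpa [PySem.List.count] using h3
          show PySem.Set.add (seen.filterMap (pvG hand)) ((3 : Int), x) = _
          rw [hadd, if_neg (hnotmem 3)]
          have hg : pvG hand x = some ((3 : Int), x) := by simp [pvG, h3]
          simp [hg]
        · replace h3 : ¬ List.count x hand = 3 := by simpa [PySem.List.count] using h3
          replace h2 : List.count x hand = 2 := by simpa [PySem.List.count] using h2
          show PySem.Set.add (seen.filterMap (pvG hand)) ((2 : Int), x) = _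
          rw [hadd, if_neg (hnotmem 2)]
          have hg : pvG hand x = some ((2 : Int), x) := by simp [pvG, h2]
          simp [hg]
        · replace h3 : ¬ List.count x hand = 3 := by simpa [PySem.List.count] using h3
          replace h2 : ¬ List.count x hand = 2 := by simpa [PySem.List.count] using h2
          have hg : pvG hand x = none := by simp [pvG, h3, h2]
          simp [hg]
      rw [harg]; exact ih (seen ++ [x])

theorem pvA_eq (hand : List Int) :
    harderTie_py hand
      = PySem.List.sorted2 ((PySem.Set.ofList hand).filterMap (pvG hand)) (fun p => p.1) (fun p => p.2) true := by
  unfold harderTie_py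
  have h0 : (PySem.Set.empty : PySem.Set (Int × Int)) = ([] : List Int).filterMap (pvG hand) := rfl
  rw [h0, pvA_loop hand hand []]
  rfl

theorem pvB_eq (hand : List Int) :
    harderTie_py_alt hand
      = PySem.List.sorted2 ((PySem.Set.ofList hand).filterMap (pvG hand)) (fun p => p.1) (fun p => p.2) true := by
  have hb : harderTie_py_alt hand
      = PySem.List.sorted2 ((PySem.Dict.counter hand).items.filterMap
          (fun p => if p.2 = 2 ∨ p.2 = 3 then some (p.2, p.1) else none)) (fun p => p.1) (fun p => p.2) true := rfl
  rw [hb, PySem.Dict.items_counter, List.filterMap_map]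
  congr 1
  apply List.filterMap_congr
  intro d _
  simp only [Function.comp]
  unfold pvG
  by_cases h3 : List.count d hand = 3
  · simp [h3]
  · by_cases h2 : List.count d hand = 2
    · simp [h2]
    · have hno : ¬(((List.count d hand : Nat) : Int) = 2 ∨ ((List.count d hand : Nat) : Int) = 3) := by
        omega
      simp [hno, h3, h2]

-- ===== VERDICT (by name: the statement is the Claim_ definition above) =====
theorem harderTie_py_spec : Claim_equal_harderTie_py := by
  intro hand _
  unfold Spec_harderTie_py
  rw [pvA_eq, pvB_eq]
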